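-- pv_equiv track=rewrite | github.com/yorikya/note-speaker | src/nlp_service.py | extract_title_from_command
-- ===== SOURCE A (Python) =====
-- def extract_title_from_command(command, canonical_phrases):
--     # Find the longest matching canonical phrase at the start of the command
--     command_lower = command.lower()
--     best_match = ''
--     for phrase in sorted(canonical_phrases, key=len, reverse=True):
--         if command_lower.startswith(phrase.lower()):
--             best_match = phrase
--             break
--     if best_match:
--         title = command[len(best_match):].strip()
--         return best_match, title
--     return None, command
-- ===== SOURCE B (Python) =====
-- def extract_title_from_command(command, canonical_phrases):
--     # Single linear pass, no sorting: keep the first phrase (in original order)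
--     # strictly longer than the current best whose lowercased form prefixes the command.
--     command_lower = command.lower()
--     best = ''
--     for phrase in canonical_phrases:
--         if len(phrase) > len(best) and command_lower.startswith(phrase.lower()):
--             best = phrase
--     if best:
--         return best, command[len(best):].strip()
--     return None, command
-- ===== Notes on version B (the rewrite author's own statement) =====
-- stated objective: alternative
-- what changed: B replaces A's sort of all phrases by length (descending) followed by a scan for the first matching prefix with a single sort-free linear pass that keeps the first phrase strictly longer than the current best whose lowercased form prefixes the command.
import Mathlib
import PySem

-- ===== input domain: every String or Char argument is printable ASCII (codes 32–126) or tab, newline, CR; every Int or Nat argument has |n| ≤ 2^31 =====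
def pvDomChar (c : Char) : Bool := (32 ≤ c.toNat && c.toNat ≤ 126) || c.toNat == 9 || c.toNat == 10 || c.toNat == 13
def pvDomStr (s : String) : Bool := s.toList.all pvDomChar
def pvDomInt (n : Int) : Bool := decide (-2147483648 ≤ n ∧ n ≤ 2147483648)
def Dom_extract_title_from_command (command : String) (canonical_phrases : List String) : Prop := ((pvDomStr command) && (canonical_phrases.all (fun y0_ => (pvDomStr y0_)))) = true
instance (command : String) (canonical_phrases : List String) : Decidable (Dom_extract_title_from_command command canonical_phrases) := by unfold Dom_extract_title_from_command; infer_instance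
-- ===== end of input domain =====

-- B replaces A's sort-then-scan (sort by length desc, take the first lowercased
-- phrase prefixing the command) with a single sort-free linear pass that keeps
-- the first strictly longer matching phrase; same return value.

-- ===== PORT A =====
-- the 'for phrase in sorted(...): if ...: best_match = phrase; break' loop
def pvFindA (cl : String) : List String → String
  | [] => ""
  | p :: rest =>
      if PySem.Str.startswith cl (PySem.Str.lower p) then p else pvFindA cl rest

def extract_title_from_command (command : String) (canonical_phrases : List String) : Option String × String :=
  let command_lower := PySem.Str.lower command
  let best_match :=
    pvFindA command_lower (PySem.List.sorted canonical_phrases (fun p => PySem.Str.len p) true)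
  if best_match ≠ "" then
    (some best_match, PySem.Str.strip (PySem.Str.slice command (some (PySem.Str.len best_match)) none))
  else
    (none, command)

-- ===== PORT B =====
def extract_title_from_command_alt (command : String) (canonical_phrases : List String) : Option String × String :=
  let command_lower := PySem.Str.lower command
  let best := canonical_phrases.foldl
    (fun best phrase =>
      if PySem.Str.len phrase > PySem.Str.len best ∧ PySem.Str.startswith command_lower (PySem.Str.lower phrase)
      then phrase else best) ""
  if best ≠ "" then
    (some best, PySem.Str.strip (PySem.Str.slice command (some (PySem.Str.len best)) none))
  else
    (none, command)

-- ===== PRECONDITION & SPEC =====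
def Spec_extract_title_from_command (command : String) (canonical_phrases : List String) (out : Option String × String) : Prop := out = extract_title_from_command_alt command canonical_phrases
instance (command : String) (canonical_phrases : List String) (out : Option String × String) : Decidable (Spec_extract_title_from_command command canonical_phrases out) := by unfold Spec_extract_title_from_command; infer_instance

-- ===== CLAIM (what is proved, stated in full; the proofs are below) =====
def Claim_equal_extract_title_from_command : Prop := ∀ (command : String) (canonical_phrases : List String), Dom_extract_title_from_command command canonical_phrases → Spec_extract_title_from_command command canonical_phrases (extract_title_from_command command canonical_phrases)

-- ===== LEMMAS AND PROOFS =====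

-- generic first-match over a list, used to reason about both loops uniformly
def pvFMg (f : String → Bool) : List String → String
  | [] => ""
  | p :: rest => if f p then p else pvFMg f rest

lemma pvFindA_eq_g (cl : String) (ss : List String) :
    pvFindA cl ss = pvFMg (fun p => PySem.Str.startswith cl (PySem.Str.lower p)) ss := by
  induction ss with
  | nil => rfl
  | cons y ys ih => simp only [pvFindA, pvFMg, ih]

lemma pvFMg_mem_or_empty (f : String → Bool) (ss : List String) :
    pvFMg f ss ∈ ss ∨ pvFMg f ss = "" := by
  induction ss with
  | nil => exact Or.inr rfl
  | cons y ys ih =>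
      by_cases h : f y = true
      · simp [pvFMg, h]
      · simp only [pvFMg, h, Bool.false_eq_true, if_false]
        rcases ih with h1 | h1
        · exact Or.inl (List.mem_cons_of_mem _ h1)
        · exact Or.inr h1

-- the crux: inserting x into a length-descending list shifts the first match
-- exactly the way B's fold step updates its best
lemma pvFMg_insertBy (f : String → Bool) (l : String → Int)
    (hnn : ∀ s, 0 ≤ l s) (hze : ∀ s, l s ≤ 0 → s = "") (he : l "" = 0)
    (x : String) (ss : List String)
    (hp : ss.Pairwise (fun a b => l b ≤ l a)) :
    pvFMg f (PySem.List.insertBy (fun a b => decide (l b < l a)) x ss)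
      = if l x > l (pvFMg f ss) ∧ f x = true then x else pvFMg f ss := by
  induction ss with
  | nil =>
      simp only [PySem.List.insertBy, pvFMg]
      by_cases hf : f x = true
      · by_cases hl : (0:Int) < l x
        · rw [if_pos hf, if_pos ⟨by omega, hf⟩]
        · have hx0 : x = "" := hze x (by omega)
          rw [if_pos hf, if_neg (by omega), hx0]
      · rw [if_neg hf, if_neg (by simp [hf])]
  | cons y ys ih =>
      rcases List.pairwise_cons.mp hp with ⟨hy, hp'⟩
      have hfm : l (pvFMg f (y :: ys)) ≤ l y := by
        rcases pvFMg_mem_or_empty f (y :: ys) with hm | hm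
        · rcases List.mem_cons.mp hm with h1 | h1
          · rw [h1]
          · exact hy _ h1
        · rw [hm]; have := hnn y; omega
      simp only [PySem.List.insertBy]
      by_cases hb : l y < l x
      · rw [if_pos (by simpa using hb)]
        by_cases hf : f x = true
        · show (if f x = true then x else pvFMg f (y :: ys)) = _
          rw [if_pos hf, if_pos ⟨by omega, hf⟩]
        · show (if f x = true then x else pvFMg f (y :: ys)) = _
          rw [if_neg hf, if_neg (by simp [hf])]
      · rw [if_neg (by simpa using hb)]
        by_cases hfy : f y = true
        · show (if f y = true then y else _) = _
          rw [if_pos hfy]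
          have hys : pvFMg f (y :: ys) = y := by simp [pvFMg, hfy]
          rw [hys, if_neg (by rintro ⟨h1, _⟩; omega)]
        · show (if f y = true then y else pvFMg f (PySem.List.insertBy _ x ys)) = _
          have hys : pvFMg f (y :: ys) = pvFMg f ys := by simp [pvFMg, hfy]
          rw [if_neg hfy, ih hp', hys]

lemma pvLen_nonneg' (s : String) : 0 ≤ PySem.Str.len s := by
  simp [PySem.Str.len_eq]

lemma pvLen_le_zero (s : String) (h : PySem.Str.len s ≤ 0) : s = "" := by
  rw [PySem.Str.len_eq] at h
  exact String.toList_eq_nil_iff.mp (List.eq_nil_of_length_eq_zero (by omega))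

lemma pvFindA_sorted_eq_fold (cl : String) (xs : List String) :
    pvFindA cl (PySem.List.sorted xs (fun p => PySem.Str.len p) true)
      = xs.foldl (fun best phrase =>
          if PySem.Str.len phrase > PySem.Str.len best ∧ PySem.Str.startswith cl (PySem.Str.lower phrase)
          then phrase else best) "" := by
  induction xs using List.reverseRecOn with
  | nil => rfl
  | append_singleton xs x ih =>
      have hs : PySem.List.sorted (xs ++ [x]) (fun p => PySem.Str.len p) true
          = PySem.List.insertBy (fun a b => decide (PySem.Str.len b < PySem.Str.len a)) x
              (PySem.List.sorted xs (fun p => PySem.Str.len p) true) := by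
        rw [PySem.List.sorted_rev_eq_foldl_insertBy, PySem.List.sorted_rev_eq_foldl_insertBy,
          List.foldl_append]
        rfl
      rw [hs, pvFindA_eq_g,
        pvFMg_insertBy (fun p => PySem.Str.startswith cl (PySem.Str.lower p)) PySem.Str.len
          pvLen_nonneg' pvLen_le_zero (by decide) x _
          (PySem.List.sorted_pairwise_rev xs (fun p => PySem.Str.len p)),
        ← pvFindA_eq_g, ih, List.foldl_append]
      rfl

-- ===== VERDICT (by name: the statement is the Claim_ definition above) =====
theorem extract_title_from_command_spec : Claim_equal_extract_title_from_command := by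
  intro command canonical_phrases _
  unfold Spec_extract_title_from_command
  simp only [extract_title_from_command, extract_title_from_command_alt,
    pvFindA_sorted_eq_fold]
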